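-- pv_equiv track=rewrite | github.com/cococooklove/minbestcs | app.py | _sentiment_by_product
-- ===== SOURCE A (Python) =====
-- def _sentiment_by_product(reviews):
--     result = {}
--     for r in reviews:
--         p = r.get("product", "기타")
--         if p not in result:
--             result[p] = {"positive": 0, "negative": 0, "mixed": 0}
--         s = r.get("sentiment")
--         if s in result[p]:
--             result[p][s] += 1
--     return result
-- ===== SOURCE B (Python) =====
-- def _sentiment_by_product(reviews):
--     # Staged passes: dedup the product labels first, then for each product count each
--     # sentiment with list.count over a filtered projection -- no incremental counter.
--     products = list(dict.fromkeys(r.get("product", "기타") for r in reviews))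
--     return {
--         p: {s: [r.get("sentiment") for r in reviews
--                 if r.get("product", "기타") == p].count(s)
--             for s in ("positive", "negative", "mixed")}
--         for p in products
--     }
-- ===== Notes on version B (the rewrite author's own statement) =====
-- stated objective: alternative
-- what changed: B replaces A's single-pass incremental nested-dict counting with staged passes: it first deduplicates the product labels, then for each product it filters the reviews and counts each of the three sentiments with list.count, never maintaining any running counter.
import Mathlib
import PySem

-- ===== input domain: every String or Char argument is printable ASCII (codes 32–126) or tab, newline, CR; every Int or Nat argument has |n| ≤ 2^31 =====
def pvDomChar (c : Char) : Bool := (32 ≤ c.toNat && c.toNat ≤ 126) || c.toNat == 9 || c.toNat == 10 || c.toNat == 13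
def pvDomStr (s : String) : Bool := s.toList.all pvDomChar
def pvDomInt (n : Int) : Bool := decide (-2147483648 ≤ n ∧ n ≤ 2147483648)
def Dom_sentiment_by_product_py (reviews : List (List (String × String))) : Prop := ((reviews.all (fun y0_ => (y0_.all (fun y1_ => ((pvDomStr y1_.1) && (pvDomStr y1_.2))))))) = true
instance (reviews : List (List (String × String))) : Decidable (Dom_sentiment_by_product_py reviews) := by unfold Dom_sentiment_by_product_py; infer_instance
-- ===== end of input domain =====

-- B first deduplicates the product labels, then counts each of the three sentiments per product
-- with a filtered count pass, instead of growing a nested dict incrementally (alternative decomposition, same results).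


-- ===== PORT A =====
-- one iteration of A's loop: ensure the product's nested zero-dict exists, then bump the valid sentiment
def stepA (result : PySem.Dict String (PySem.Dict String Int)) (r : List (String × String)) :
    PySem.Dict String (PySem.Dict String Int) :=
  let p := (List.lookup "product" r).getD "기타"
  let result1 := if result.contains p then result
    else result.insert p (PySem.Dict.ofList [("positive", 0), ("negative", 0), ("mixed", 0)])
  match List.lookup "sentiment" r with
  | some s =>
      if (result1.getD p PySem.Dict.empty).contains s then
        result1.modify p PySem.Dict.empty (fun inner => inner.modify s 0 (· + 1))
      else result1
  | none => result1

def sentiment_by_product_py (reviews : List (List (String × String))) : List (String × List (String × Int)) :=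
  (reviews.foldl stepA PySem.Dict.empty).items.map (fun kv => (kv.1, kv.2.items))

-- ===== PORT B =====
-- r.get("product", "기타")
def labelOf (r : List (String × String)) : String := (List.lookup "product" r).getD "기타"

def sentiment_by_product_py_alt (reviews : List (List (String × String))) : List (String × List (String × Int)) :=
  let products := PySem.List.dedup (reviews.map labelOf)
  products.map (fun p =>
    let sents := (reviews.filter (fun r => labelOf r == p)).map (fun r => List.lookup "sentiment" r)
    (p, [("positive", PySem.List.count sents (some "positive")),
         ("negative", PySem.List.count sents (some "negative")),
         ("mixed", PySem.List.count sents (some "mixed"))]))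

-- ===== PRECONDITION & SPEC =====
def Spec_sentiment_by_product_py (reviews : List (List (String × String))) (out : List (String × List (String × Int))) : Prop := out = sentiment_by_product_py_alt reviews
instance (reviews : List (List (String × String))) (out : List (String × List (String × Int))) : Decidable (Spec_sentiment_by_product_py reviews out) := by unfold Spec_sentiment_by_product_py; infer_instance

-- ===== CLAIM =====
def Claim_equal_sentiment_by_product_py : Prop := ∀ (reviews : List (List (String × String))), Dom_sentiment_by_product_py reviews → Spec_sentiment_by_product_py reviews (sentiment_by_product_py reviews)

-- ===== LEMMAS AND PROOFS =====

-- B's count of sentiment s for product p within rest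
def C (rest : List (List (String × String))) (p s : String) : Int :=
  PySem.List.count ((rest.filter (fun r => labelOf r == p)).map (fun r => List.lookup "sentiment" r)) (some s)

-- the canonical inner dict with values given by g
def innerG (g : String → Int) : PySem.Dict String Int :=
  PySem.Dict.mk [("positive", g "positive"), ("negative", g "negative"), ("mixed", g "mixed")]

lemma C_cons (r : List (String × String)) (rest : List (List (String × String))) (p s : String) :
    C (r :: rest) p s
      = (if labelOf r = p ∧ List.lookup "sentiment" r = some s then 1 else 0) + C rest p s := by
  unfold C
  rw [List.filter_cons]
  by_cases hp : labelOf r = p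
  · simp only [hp, beq_self_eq_true, if_pos, List.map_cons]
    by_cases hs : List.lookup "sentiment" r = some s
    · simp [PySem.List.count, hs]
      omega
    · simp [PySem.List.count, hs]
  · simp [hp, beq_iff_eq]

lemma modify_innerG (g : String → Int) (s : String)
    (hs : s = "positive" ∨ s = "negative" ∨ s = "mixed") :
    (innerG g).modify s 0 (· + 1)
      = innerG (fun t => g t + if t = s then 1 else 0) := by
  rcases hs with h | h | h <;> subst h <;>
  · simp only [innerG]
    generalize g "positive" = a
    generalize g "negative" = b
    generalize g "mixed" = c
    simp [PySem.Dict.modify, PySem.Dict.insert, PySem.Dict.getD, PySem.Dict.get?, PySem.Dict.contains]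

lemma innerG_congr {f g : String → Int}
    (h1 : f "positive" = g "positive") (h2 : f "negative" = g "negative")
    (h3 : f "mixed" = g "mixed") : innerG f = innerG g := by
  simp only [innerG, h1, h2, h3]

-- effect of one A-iteration on the invariant
lemma stepA_spec (result : PySem.Dict String (PySem.Dict String Int)) (r : List (String × String))
    (g : String → String → Int)
    (hnd : result.keys.Nodup)
    (h3 : ∀ q ∈ result.keys, result.getD q PySem.Dict.empty = innerG (fun s => g q s))
    (h0 : labelOf r ∉ result.keys → ∀ s, g (labelOf r) s = 0) :
    (stepA result r).keys = PySem.Set.add result.keys (labelOf r)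
    ∧ (PySem.Set.add result.keys (labelOf r)).Nodup
    ∧ ∀ q ∈ PySem.Set.add result.keys (labelOf r),
        (stepA result r).getD q PySem.Dict.empty
          = innerG (fun s => g q s + if q = labelOf r ∧ List.lookup "sentiment" r = some s then 1 else 0) := by
  have hp_def : (List.lookup "product" r).getD "기타" = labelOf r := rfl
  by_cases hc : result.contains (labelOf r)
  · -- product already present
    have hpmem : labelOf r ∈ result.keys := by
      rw [PySem.Dict.contains_eq_decide_mem_keys] at hc; simpa using hc
    have hAdd : PySem.Set.add result.keys (labelOf r) = result.keys := by
      simp [PySem.Set.add, hpmem]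
    have hstep : stepA result r =
        (match List.lookup "sentiment" r with
         | some s => if (result.getD (labelOf r) PySem.Dict.empty).contains s then
              result.modify (labelOf r) PySem.Dict.empty (fun inner => inner.modify s 0 (· + 1))
            else result
         | none => result) := by
      simp only [stepA, hp_def, hc, if_true]
    rw [hAdd]
    cases hlk : List.lookup "sentiment" r with
    | none =>
      simp only [hstep, hlk]
      refine ⟨by simp, hnd, ?_⟩
      intro q hq
      rw [h3 q hq]
      exact innerG_congr (by simp) (by simp) (by simp)
    | some s =>
      simp only [hstep, hlk]
      by_cases htrio : s = "positive" ∨ s = "negative" ∨ s = "mixed"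
      · have hcin : (result.getD (labelOf r) PySem.Dict.empty).contains s = true := by
          rw [h3 _ hpmem]
          rcases htrio with h | h | h <;> subst h <;> simp [innerG, PySem.Dict.contains_mk]
        rw [if_pos hcin]
        refine ⟨by rw [PySem.Dict.keys_modify, PySem.Dict.keys_insert_of_contains _ _ hc], hnd, ?_⟩
        intro q hq
        rw [PySem.Dict.getD_modify]
        by_cases hqp : q = labelOf r
        · subst hqp
          rw [if_pos rfl, h3 _ hq, modify_innerG _ s htrio]
          refine innerG_congr ?_ ?_ ?_ <;>
          · by_cases h : s = "positive" <;> by_cases h' : s = "negative" <;>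
              by_cases h'' : s = "mixed" <;> simp_all
        · rw [if_neg hqp, h3 q hq]
          exact innerG_congr (by simp [hqp]) (by simp [hqp]) (by simp [hqp])
      · have hcin : (result.getD (labelOf r) PySem.Dict.empty).contains s = false := by
          rw [h3 _ hpmem]
          simp only [not_or] at htrio
          obtain ⟨t1, t2, t3⟩ := htrio
          simp [innerG, PySem.Dict.contains_mk]
          exact ⟨fun h => t1 h.symm, fun h => t2 h.symm, fun h => t3 h.symm⟩
        rw [if_neg (by simp [hcin])]
        refine ⟨by simp, hnd, ?_⟩
        intro q hq
        rw [h3 q hq]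
        simp only [not_or] at htrio
        obtain ⟨t1, t2, t3⟩ := htrio
        exact innerG_congr (by simp [t1]) (by simp [t2]) (by simp [t3])
  · -- new product: insert the zero row first
    have hpmem : labelOf r ∉ result.keys := by
      rw [PySem.Dict.contains_eq_decide_mem_keys] at hc; simpa using hc
    have hAdd : PySem.Set.add result.keys (labelOf r) = result.keys ++ [labelOf r] := by
      simp [PySem.Set.add, hpmem]
    set result1 := result.insert (labelOf r)
        (PySem.Dict.ofList [("positive", 0), ("negative", 0), ("mixed", 0)]) with hr1
    have hk1 : result1.keys = result.keys ++ [labelOf r] := by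
      rw [hr1, PySem.Dict.keys_insert_of_not_contains _ _ (by simpa using hc)]
    have hnd1 : (result.keys ++ [labelOf r]).Nodup := by
      simp [List.nodup_append, hnd]
      intro a ha h
      exact hpmem (h ▸ ha)
    have h3' : ∀ q ∈ result1.keys, result1.getD q PySem.Dict.empty = innerG (fun s => g q s) := by
      intro q hq
      rw [hk1] at hq
      rcases List.mem_append.mp hq with hq | hq
      · have hqp : q ≠ labelOf r := fun h => hpmem (h ▸ hq)
        rw [hr1, PySem.Dict.getD_insert_of_ne _ _ _ hqp]
        exact h3 q hq
      · have hq : q = labelOf r := by simpa using hq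
        subst hq
        rw [hr1, PySem.Dict.getD_insert_self]
        -- the new row starts at zero, matching g's zeros outside the keys
        have hz := h0 hpmem
        simp only [innerG, hz]
        rfl
    have hstep : stepA result r =
        (match List.lookup "sentiment" r with
         | some s => if (result1.getD (labelOf r) PySem.Dict.empty).contains s then
              result1.modify (labelOf r) PySem.Dict.empty (fun inner => inner.modify s 0 (· + 1))
            else result1
         | none => result1) := by
      simp only [stepA, hp_def, hc, Bool.false_eq_true, if_false, hr1]
    have hpmem1 : labelOf r ∈ result1.keys := by
      rw [hk1]; exact List.mem_append.mpr (Or.inr (by simp))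
    have hc1 : result1.contains (labelOf r) = true := by
      rw [PySem.Dict.contains_eq_decide_mem_keys]; simpa using hpmem1
    rw [hAdd, ← hk1]
    cases hlk : List.lookup "sentiment" r with
    | none =>
      simp only [hstep, hlk]
      refine ⟨by simp, hk1 ▸ hnd1, ?_⟩
      intro q hq
      rw [h3' q hq]
      exact innerG_congr (by simp) (by simp) (by simp)
    | some s =>
      simp only [hstep, hlk]
      by_cases htrio : s = "positive" ∨ s = "negative" ∨ s = "mixed"
      · have hcin : (result1.getD (labelOf r) PySem.Dict.empty).contains s = true := by
          rw [h3' _ hpmem1]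
          rcases htrio with h | h | h <;> subst h <;> simp [innerG, PySem.Dict.contains_mk]
        rw [if_pos hcin]
        refine ⟨by rw [PySem.Dict.keys_modify, PySem.Dict.keys_insert_of_contains _ _ hc1], hk1 ▸ hnd1, ?_⟩
        intro q hq
        rw [PySem.Dict.getD_modify]
        by_cases hqp : q = labelOf r
        · subst hqp
          rw [if_pos rfl, h3' _ hq, modify_innerG _ s htrio]
          refine innerG_congr ?_ ?_ ?_ <;>
          · by_cases h : s = "positive" <;> by_cases h' : s = "negative" <;>
              by_cases h'' : s = "mixed" <;> simp_all
        · rw [if_neg hqp, h3' q hq]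
          exact innerG_congr (by simp [hqp]) (by simp [hqp]) (by simp [hqp])
      · have hcin : (result1.getD (labelOf r) PySem.Dict.empty).contains s = false := by
          rw [h3' _ hpmem1]
          simp only [not_or] at htrio
          obtain ⟨t1, t2, t3⟩ := htrio
          simp [innerG, PySem.Dict.contains_mk]
          exact ⟨fun h => t1 h.symm, fun h => t2 h.symm, fun h => t3 h.symm⟩
        rw [if_neg (by simp [hcin])]
        refine ⟨by simp, hk1 ▸ hnd1, ?_⟩
        intro q hq
        rw [h3' q hq]
        simp only [not_or] at htrio
        obtain ⟨t1, t2, t3⟩ := htrio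
        exact innerG_congr (by simp [t1]) (by simp [t2]) (by simp [t3])

-- main invariant over A's fold
lemma inv_fold (rest : List (List (String × String))) :
    ∀ (result : PySem.Dict String (PySem.Dict String Int)) (g : String → String → Int),
    result.keys.Nodup →
    (∀ q ∈ result.keys, result.getD q PySem.Dict.empty = innerG (fun s => g q s)) →
    (∀ q, q ∉ result.keys → ∀ s, g q s = 0) →
    (rest.foldl stepA result).items.map (fun kv => (kv.1, kv.2.items))
      = (rest.foldl (fun acc r => PySem.Set.add acc (labelOf r)) result.keys).map
          (fun p => (p, [("positive", g p "positive" + C rest p "positive"),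
                         ("negative", g p "negative" + C rest p "negative"),
                         ("mixed", g p "mixed" + C rest p "mixed")])) := by
  induction rest with
  | nil =>
    intro result g hnd h3 h0
    simp only [List.foldl_nil]
    rw [PySem.Dict.items_eq_map_keys result hnd PySem.Dict.empty]
    rw [List.map_map]
    apply List.map_congr_left
    intro q hq
    simp only [Function.comp]
    rw [h3 q hq]
    simp [innerG, C, PySem.List.count]
  | cons r rest ih =>
    intro result g hnd h3 h0
    simp only [List.foldl_cons]
    obtain ⟨k0, k1, k2⟩ := stepA_spec result r g hnd h3 (h0 _)
    rw [ih (stepA result r)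
        (fun q s => g q s + if q = labelOf r ∧ List.lookup "sentiment" r = some s then 1 else 0)
        (k0 ▸ k1) (fun q hq => k2 q (k0 ▸ hq))
        (by
          intro q hq s
          rw [k0] at hq
          have hq1 : q ∉ result.keys :=
            fun h => hq ((PySem.Set.mem_add _ _ _).mpr (Or.inl h))
          have hq2 : q ≠ labelOf r :=
            fun h => hq ((PySem.Set.mem_add _ _ _).mpr (Or.inr h))
          simp [h0 q hq1, hq2]),
      k0]
    apply List.map_congr_left
    intro p hp
    simp only [Prod.mk.injEq, List.cons.injEq, true_and, and_true]
    refine ⟨?_, ?_, ?_⟩ <;>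
    · rw [C_cons]
      by_cases h2 : p = labelOf r <;> (simp [h2, eq_comm]; try ring)

-- ===== VERDICT =====
theorem sentiment_by_product_py_spec : Claim_equal_sentiment_by_product_py := by
  intro reviews _
  unfold Spec_sentiment_by_product_py sentiment_by_product_py sentiment_by_product_py_alt
  have hkeys : (PySem.Dict.empty : PySem.Dict String (PySem.Dict String Int)).keys = [] := rfl
  rw [inv_fold reviews PySem.Dict.empty (fun _ _ => 0)
      (by rw [hkeys]; exact List.nodup_nil)
      (by intro q hq; rw [hkeys] at hq; cases hq)
      (by intro q _ s; rfl),
    hkeys]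
  rw [PySem.List.dedup_eq_ofList, PySem.Set.ofList_eq_foldl, List.foldl_map]
  apply List.map_congr_left
  intro p hp
  simp [C]
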